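-- pv_equiv track=rewrite | github.com/pastuszko28/Venom | venom_core/api/routes/academy_models.py | resolve_recommended_runtime
-- ===== SOURCE A (Python) =====
-- from typing import Any, Dict, List, Literal, Optional, Set
--
-- LOCAL_RUNTIME_PREFERENCE = ("vllm", "ollama", "onnx")
--
-- def resolve_recommended_runtime(
--     runtime_compatibility: Dict[str, bool],
-- ) -> Optional[str]:
--     """Resolve primary runtime from compatibility map."""
--     for runtime in LOCAL_RUNTIME_PREFERENCE:
--         if runtime_compatibility.get(runtime):
--             return runtime
--     for runtime in sorted(runtime_compatibility):
--         if runtime_compatibility.get(runtime):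
--             return runtime
--     return None
-- ===== SOURCE B (Python) =====
-- LOCAL_RUNTIME_PREFERENCE = ("vllm", "ollama", "onnx")
--
-- def resolve_recommended_runtime(runtime_compatibility):
--     """Resolve primary runtime from compatibility map (single min-by-key pass)."""
--     compatible = [r for r, v in runtime_compatibility.items() if v]
--     if not compatible:
--         return None
--
--     def priority(r):
--         try:
--             i = LOCAL_RUNTIME_PREFERENCE.index(r)
--         except ValueError:
--             i = len(LOCAL_RUNTIME_PREFERENCE)
--         return (i, r)
--
--     return min(compatible, key=priority)
-- ===== Notes on version B (the rewrite author's own statement) =====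
-- stated objective: alternative
-- what changed: Replaces A's two sequential scans (preference probe, then sort-all-keys-and-scan) with one collection of the truthy runtimes and a single min-by-composite-key (preference index, name) pass, eliminating the sort.
import Mathlib
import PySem

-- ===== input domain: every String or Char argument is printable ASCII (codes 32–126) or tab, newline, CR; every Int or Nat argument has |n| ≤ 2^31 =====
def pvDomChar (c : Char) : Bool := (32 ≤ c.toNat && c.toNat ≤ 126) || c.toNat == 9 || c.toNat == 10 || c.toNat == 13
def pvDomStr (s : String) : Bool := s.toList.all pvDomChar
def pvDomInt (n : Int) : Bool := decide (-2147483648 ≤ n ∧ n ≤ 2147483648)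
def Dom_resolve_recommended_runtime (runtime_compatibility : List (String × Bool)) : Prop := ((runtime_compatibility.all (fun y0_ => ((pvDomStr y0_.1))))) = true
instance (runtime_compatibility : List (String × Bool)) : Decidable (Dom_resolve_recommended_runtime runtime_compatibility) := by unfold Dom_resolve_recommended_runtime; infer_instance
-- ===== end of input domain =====

-- B collects the truthy runtimes once and takes a single min by the composite key
-- (preference index, name) instead of A's preference probe followed by sort-and-scan.

-- ===== PORT A =====
def LOCAL_RUNTIME_PREFERENCE : List String := ["vllm", "ollama", "onnx"]

-- for runtime in LOCAL_RUNTIME_PREFERENCE: if d.get(runtime): return runtime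
-- for runtime in sorted(d): if d.get(runtime): return runtime
-- return None
def resolve_recommended_runtime (runtime_compatibility : List (String × Bool)) : Option String :=
  let d := PySem.Dict.ofList runtime_compatibility
  match LOCAL_RUNTIME_PREFERENCE.find? (fun r => d.getD r false) with
  | some r => some r
  | none =>
      (PySem.List.sorted (PySem.Dict.keys d) (fun k => k) false).find?
        (fun r => d.getD r false)

-- ===== PORT B =====
-- priority(r) = (LOCAL_RUNTIME_PREFERENCE.index(r) if present, else len = 3, r)
def rrIdx (r : String) : Nat :=
  match PySem.List.index? LOCAL_RUNTIME_PREFERENCE r with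
  | some i => i
  | none => 3

def resolve_recommended_runtime_alt (runtime_compatibility : List (String × Bool)) : Option String :=
  let d := PySem.Dict.ofList runtime_compatibility
  let compatible := d.items.filterMap (fun p => if p.2 then some p.1 else none)
  match compatible with
  | [] => none
  | _ => PySem.List.min2? compatible rrIdx (fun r => r)

-- ===== PRECONDITION & SPEC =====
def Spec_resolve_recommended_runtime (runtime_compatibility : List (String × Bool)) (out : Option String) : Prop := out = resolve_recommended_runtime_alt runtime_compatibility
instance (runtime_compatibility : List (String × Bool)) (out : Option String) : Decidable (Spec_resolve_recommended_runtime runtime_compatibility out) := by unfold Spec_resolve_recommended_runtime; infer_instance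

-- ===== CLAIM (what is proved, stated in full; the proofs are below) =====
def Claim_equal_resolve_recommended_runtime : Prop := ∀ (runtime_compatibility : List (String × Bool)), Dom_resolve_recommended_runtime runtime_compatibility → Spec_resolve_recommended_runtime runtime_compatibility (resolve_recommended_runtime runtime_compatibility)

-- ===== LEMMAS AND PROOFS =====

-- rrIdx computed by cases on the three preferred names
lemma rrIdx_eq (r : String) :
    rrIdx r = if r = "vllm" then 0 else if r = "ollama" then 1 else if r = "onnx" then 2 else 3 := by
  by_cases h1 : r = "vllm"
  · subst h1; decide
  by_cases h2 : r = "ollama"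
  · subst h2; decide
  by_cases h3 : r = "onnx"
  · subst h3; decide
  have hnone : List.idxOf? r LOCAL_RUNTIME_PREFERENCE = none := by
    simp [List.idxOf?_eq_none_iff, LOCAL_RUNTIME_PREFERENCE, h1, h2, h3]
  simp [rrIdx, PySem.List.index?, hnone, h1, h2, h3]

lemma rrIdx_cases (y : String) :
    (y = "vllm" ∧ rrIdx y = 0) ∨ (y = "ollama" ∧ rrIdx y = 1) ∨ (y = "onnx" ∧ rrIdx y = 2)
      ∨ (y ≠ "vllm" ∧ y ≠ "ollama" ∧ y ≠ "onnx" ∧ rrIdx y = 3) := by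
  by_cases h1 : y = "vllm"
  · exact Or.inl ⟨h1, by rw [rrIdx_eq, if_pos h1]⟩
  by_cases h2 : y = "ollama"
  · exact Or.inr (Or.inl ⟨h2, by rw [rrIdx_eq, if_neg h1, if_pos h2]⟩)
  by_cases h3 : y = "onnx"
  · exact Or.inr (Or.inr (Or.inl ⟨h3, by rw [rrIdx_eq, if_neg h1, if_neg h2, if_pos h3]⟩))
  · exact Or.inr (Or.inr (Or.inr ⟨h1, h2, h3, by rw [rrIdx_eq, if_neg h1, if_neg h2, if_neg h3]⟩))

-- the strict-lex order B's composite key induces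
def rrLt (m y : String) : Prop :=
  rrIdx m < rrIdx y ∨ (¬ rrIdx y < rrIdx m ∧ m < y)

-- the comparison Bool of min2?'s fold
lemma rr_cond_self (z : String) :
    (decide (rrIdx z < rrIdx z) || !decide (rrIdx z < rrIdx z) && decide (z < z)) = false := by
  simp

lemma rr_cond_keep {x z : String} (h : rrLt z x) :
    (decide (rrIdx x < rrIdx z) || !decide (rrIdx z < rrIdx x) && decide (x < z)) = false := by
  rcases h with h | ⟨h1, h2⟩
  · have h' : ¬ rrIdx x < rrIdx z := by omega
    simp [h, h']
  · have h' : ¬ x < z := lt_asymm h2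
    simp [h1, h']

lemma rr_cond_replace {z m : String} (h : rrLt m z) :
    (decide (rrIdx m < rrIdx z) || !decide (rrIdx z < rrIdx m) && decide (m < z)) = true := by
  rcases h with h | ⟨h1, h2⟩
  · simp [h]
  · simp [h1, h2]

-- one step of min2?'s fold
def rrStep (acc : Option String) (x : String) : Option String :=
  match acc with
  | none => some x
  | some mm => if (decide (rrIdx x < rrIdx mm) || !decide (rrIdx mm < rrIdx x) && decide (x < mm)) = true then some x else some mm

-- min2? spelled as the fold it is defined to be
lemma min2?_as_fold (xs : List String) :
    PySem.List.min2? xs rrIdx (fun r => r) = List.foldl rrStep none xs := by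
  unfold PySem.List.min2?
  apply PySem.List.foldl_congr_mem
  intro acc x _
  cases acc <;> rfl

-- the fold of min2? ends at m once the accumulator is m or strictly above m
lemma rr_foldl_aux (xs : List String) (m : String)
    (hstrict : ∀ y ∈ xs, y ≠ m → rrLt m y) :
    ∀ z, (z = m ∨ rrLt m z) → (m ∈ xs ∨ z = m) →
    List.foldl rrStep (some z) xs = some m := by
  induction xs with
  | nil =>
      intro z _ hmem
      rcases hmem with h | h
      · exact absurd h (List.not_mem_nil)
      · simp [h]
  | cons x t ih =>
      intro z hz hmem
      have hstrict' : ∀ y ∈ t, y ≠ m → rrLt m y := fun y hy => hstrict y (List.mem_cons_of_mem _ hy)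
      simp only [List.foldl_cons, rrStep]
      rcases hz with hzm | hlt
      · -- accumulator is m; it stays m
        subst hzm
        by_cases hx : x = z
        · rw [hx]
          rw [if_neg (by rw [rr_cond_self]; simp)]
          exact ih hstrict' z (Or.inl rfl) (Or.inr rfl)
        · have hl := hstrict x List.mem_cons_self hx
          rw [if_neg (by rw [rr_cond_keep hl]; simp)]
          exact ih hstrict' z (Or.inl rfl) (Or.inr rfl)
      · -- accumulator z is strictly above m
        by_cases hx : x = m
        · subst hx
          rw [if_pos (rr_cond_replace hlt)]
          exact ih hstrict' x (Or.inl rfl) (Or.inr rfl)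
        · have hlx := hstrict x List.mem_cons_self hx
          have hmem' : m ∈ t := by
            rcases hmem with hm | hm
            · rcases List.mem_cons.mp hm with h | h
              · exact absurd h.symm hx
              · exact h
            · exfalso
              rw [hm] at hlt
              rcases hlt with h | ⟨_, h2⟩
              · exact lt_irrefl _ h
              · exact lt_irrefl _ h2
          by_cases hc : (decide (rrIdx x < rrIdx z) || !decide (rrIdx z < rrIdx x) && decide (x < z)) = true
          · rw [if_pos hc]
            exact ih hstrict' x (Or.inr hlx) (Or.inl hmem')
          · rw [if_neg hc]
            exact ih hstrict' z (Or.inr hlt) (Or.inl hmem')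

-- min2? returns m when m is the strict minimum of the list
lemma min2?_eq_some_of_strict (xs : List String) (m : String)
    (hm : m ∈ xs) (hstrict : ∀ y ∈ xs, y ≠ m → rrLt m y) :
    PySem.List.min2? xs rrIdx (fun r => r) = some m := by
  cases xs with
  | nil => cases hm
  | cons x t =>
      have hz : x = m ∨ rrLt m x := by
        by_cases h : x = m
        · exact Or.inl h
        · exact Or.inr (hstrict x List.mem_cons_self h)
      have hmem : m ∈ t ∨ x = m := by
        rcases List.mem_cons.mp hm with h | h
        · exact Or.inr h.symm
        · exact Or.inl h
      rw [min2?_as_fold]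
      simp only [List.foldl_cons, rrStep]
      exact rr_foldl_aux t m (fun y hy => hstrict y (List.mem_cons_of_mem _ hy)) x hz hmem

-- a find? hit on a (≤)-pairwise list is ≤ every hit
lemma find?_pairwise_le (l : List String) (p : String → Bool)
    (hp : l.Pairwise (fun a b : String => a ≤ b)) (r : String) (hr : l.find? p = some r) :
    ∀ y ∈ l, p y = true → r ≤ y := by
  induction l with
  | nil => cases hr
  | cons x t ih =>
      rcases List.pairwise_cons.mp hp with ⟨hx, ht⟩
      by_cases hpx : p x = true
      · rw [List.find?_cons_of_pos hpx] at hr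
        obtain rfl : x = r := Option.some_inj.mp hr
        intro y hy _
        rcases List.mem_cons.mp hy with rfl | hy'
        · exact le_refl _
        · exact hx y hy'
      · rw [List.find?_cons_of_neg hpx] at hr
        intro y hy hpy
        rcases List.mem_cons.mp hy with rfl | hy'
        · exact absurd hpy hpx
        · exact ih ht hr y hy' hpy

-- membership in B's `compatible` list, for a dict with Nodup keys
lemma mem_compatible_iff (d : PySem.Dict String Bool) (hnd : d.keys.Nodup) (r : String) :
    r ∈ d.items.filterMap (fun p => if p.2 then some p.1 else none) ↔ d.getD r false = true := by
  constructor
  · intro h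
    rcases List.mem_filterMap.mp h with ⟨⟨p1, p2⟩, hp, hpe⟩
    dsimp only at hpe
    by_cases hb : p2 = true
    · subst hb
      rw [if_pos rfl] at hpe
      obtain rfl : p1 = r := Option.some_inj.mp hpe
      exact PySem.Dict.getD_of_mem_items d hp hnd false
    · rw [if_neg hb] at hpe; cases hpe
  · intro h
    have hg : d.get? r = some true := by
      rw [PySem.Dict.getD_eq_get?_getD] at h
      cases hgc : d.get? r with
      | none => rw [hgc] at h; simp at h
      | some v => rw [hgc] at h; simp at h; rw [h]
    exact List.mem_filterMap.mpr ⟨(r, true), PySem.Dict.mem_items_of_get?_eq_some d hg, by simp⟩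

-- the two ports agree
lemma rr_main (rc : List (String × Bool)) :
    resolve_recommended_runtime rc = resolve_recommended_runtime_alt rc := by
  simp only [resolve_recommended_runtime, resolve_recommended_runtime_alt]
  set d := PySem.Dict.ofList rc with hd
  have hnd : d.keys.Nodup := PySem.Dict.nodup_keys_ofList rc
  set T := d.items.filterMap (fun p => if p.2 then some p.1 else none) with hT
  have hmemT : ∀ r, r ∈ T ↔ d.getD r false = true := mem_compatible_iff d hnd
  have hkeysOf : ∀ y, d.getD y false = true → y ∈ PySem.List.sorted (PySem.Dict.keys d) (fun k => k) false := by
    intro y hy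
    have hyk : y ∈ d.keys := by
      by_contra hk
      have hnone : d.get? y = none := (PySem.Dict.get?_eq_none_iff_not_mem_keys d y).mpr hk
      rw [PySem.Dict.getD_eq_get?_getD, hnone] at hy
      simp at hy
    exact ((PySem.List.sorted_perm _ _ _).mem_iff).mpr hyk
  cases hfind : LOCAL_RUNTIME_PREFERENCE.find? (fun r => d.getD r false) with
  | some r =>
      have hokr : d.getD r false = true := by simpa using List.find?_some hfind
      have hrT : r ∈ T := (hmemT r).mpr hokr
      have h3 : (r = "vllm")
          ∨ (d.getD "vllm" false = false ∧ r = "ollama")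
          ∨ (d.getD "vllm" false = false ∧ d.getD "ollama" false = false ∧ r = "onnx") := by
        rw [show LOCAL_RUNTIME_PREFERENCE = "vllm" :: "ollama" :: "onnx" :: [] from rfl] at hfind
        by_cases h1 : d.getD "vllm" false = true
        · rw [List.find?_cons_of_pos (by simpa using h1)] at hfind
          exact Or.inl (Option.some_inj.mp hfind).symm
        · have h1' : d.getD "vllm" false = false := by simpa using h1
          rw [List.find?_cons_of_neg (by simpa using h1)] at hfind
          by_cases h2 : d.getD "ollama" false = true
          · rw [List.find?_cons_of_pos (by simpa using h2)] at hfind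
            exact Or.inr (Or.inl ⟨h1', (Option.some_inj.mp hfind).symm⟩)
          · have h2' : d.getD "ollama" false = false := by simpa using h2
            rw [List.find?_cons_of_neg (by simpa using h2)] at hfind
            by_cases h3 : d.getD "onnx" false = true
            · rw [List.find?_cons_of_pos (by simpa using h3)] at hfind
              exact Or.inr (Or.inr ⟨h1', h2', (Option.some_inj.mp hfind).symm⟩)
            · rw [List.find?_cons_of_neg (by simpa using h3)] at hfind
              cases hfind
      have hstrict : ∀ y ∈ T, y ≠ r → rrLt r y := by
        intro y hyT hyr
        have hoky : d.getD y false = true := (hmemT y).mp hyT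
        left
        rcases h3 with rfl | ⟨h1, rfl⟩ | ⟨h1, h2, rfl⟩
        · rw [show rrIdx "vllm" = 0 from by decide]
          rcases rrIdx_cases y with ⟨a, _⟩ | ⟨_, b⟩ | ⟨_, b⟩ | ⟨_, _, _, b⟩
          · exact absurd a hyr
          all_goals rw [b]; omega
        · rw [show rrIdx "ollama" = 1 from by decide]
          rcases rrIdx_cases y with ⟨a, _⟩ | ⟨a, _⟩ | ⟨_, b⟩ | ⟨_, _, _, b⟩
          · rw [a] at hoky; simp [h1] at hoky
          · exact absurd a hyr
          all_goals rw [b]; omega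
        · rw [show rrIdx "onnx" = 2 from by decide]
          rcases rrIdx_cases y with ⟨a, _⟩ | ⟨a, _⟩ | ⟨a, _⟩ | ⟨_, _, _, b⟩
          · rw [a] at hoky; simp [h1] at hoky
          · rw [a] at hoky; simp [h2] at hoky
          · exact absurd a hyr
          · rw [b]; omega
      have hmin := min2?_eq_some_of_strict T r hrT hstrict
      cases hTc : T with
      | nil => simp [hTc] at hrT
      | cons a t =>
          rw [hTc] at hmin
          dsimp only
          exact hmin.symm
  | none =>
      have hprefnone : ∀ x ∈ LOCAL_RUNTIME_PREFERENCE, d.getD x false = false := by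
        intro x hx
        have := List.find?_eq_none.mp hfind x hx
        simpa using this
      have hnotpref : ∀ y, d.getD y false = true → rrIdx y = 3 := by
        intro y hy
        have hv := hprefnone "vllm" (by decide)
        have ho := hprefnone "ollama" (by decide)
        have hx := hprefnone "onnx" (by decide)
        rcases rrIdx_cases y with ⟨a, _⟩ | ⟨a, _⟩ | ⟨a, _⟩ | ⟨_, _, _, b⟩
        · rw [a] at hy; simp [hv] at hy
        · rw [a] at hy; simp [ho] at hy
        · rw [a] at hy; simp [hx] at hy
        · exact b
      cases hfind2 : (PySem.List.sorted (PySem.Dict.keys d) (fun k => k) false).find? (fun r => d.getD r false) with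
      | none =>
          have hTnil : T = [] := by
            rw [List.eq_nil_iff_forall_not_mem]
            intro y hyT
            have hoky := (hmemT y).mp hyT
            have := List.find?_eq_none.mp hfind2 y (hkeysOf y hoky)
            simp [hoky] at this
          rw [hTnil]
      | some r =>
          have hokr : d.getD r false = true := by simpa using List.find?_some hfind2
          have hrT : r ∈ T := (hmemT r).mpr hokr
          have hstrict : ∀ y ∈ T, y ≠ r → rrLt r y := by
            intro y hyT hyr
            have hoky : d.getD y false = true := (hmemT y).mp hyT
            right
            refine ⟨by rw [hnotpref y hoky, hnotpref r hokr]; omega, ?_⟩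
            have hle : r ≤ y := by
              refine find?_pairwise_le _ _ ?_ r hfind2 y (hkeysOf y hoky) (by simpa using hoky)
              have := PySem.List.sorted_pairwise (PySem.Dict.keys d) (fun k : String => k)
              simpa using this
            exact lt_of_le_of_ne hle (Ne.symm hyr)
          have hmin := min2?_eq_some_of_strict T r hrT hstrict
          cases hTc : T with
          | nil => simp [hTc] at hrT
          | cons a t =>
              rw [hTc] at hmin
              dsimp only
              exact hmin.symm

-- ===== VERDICT (by name: the statement is the Claim_ definition above) =====
theorem resolve_recommended_runtime_spec : Claim_equal_resolve_recommended_runtime := by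
  intro rc _
  show resolve_recommended_runtime rc = resolve_recommended_runtime_alt rc
  exact rr_main rc
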